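-- pv_equiv track=rewrite | github.com/Taardisaa/bottled_ai | rs/utils/llm_utils.py | _fallback_encoding_name_for_model
-- ===== SOURCE A (Python) =====
-- _TOKENIZER_PROVIDER_PREFIXES = {
--     "openai",
--     "openrouter",
--     "anthropic",
--     "azure",
--     "hosted_vllm",
--     "vertex_ai",
--     "bedrock",
--     "ollama",
-- }
--
-- def _normalize_model_for_tokenizer(model: str) -> str:
--     normalized = str(model).strip()
--     if normalized == "":
--         return normalized
--
--     parts = normalized.split("/")
--     while len(parts) > 1 and parts[0].strip().lower() in _TOKENIZER_PROVIDER_PREFIXES: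
--         parts = parts[1:]
--
--     return "/".join(part.strip() for part in parts if part.strip())
--
-- def _fallback_encoding_name_for_model(model: str) -> str:
--     normalized = _normalize_model_for_tokenizer(model).lower()
--     modern_families = (
--         "gpt-4o",
--         "gpt-4.1",
--         "gpt-5",
--         "o1",
--         "o3",
--         "o4",
--         "qwen",
--         "deepseek",
--         "llama",
--         "claude",
--         "gemini",
--         "mistral",
--     )
--     if any(normalized.startswith(prefix) or f"/{prefix}" in normalized for prefix in modern_families):
--         return "o200k_base"
--     return "cl100k_base"
-- ===== SOURCE B (Python) =====
-- _TOKENIZER_PROVIDER_PREFIXES = {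
--     "openai",
--     "openrouter",
--     "anthropic",
--     "azure",
--     "hosted_vllm",
--     "vertex_ai",
--     "bedrock",
--     "ollama",
-- }
--
-- _MODERN_FAMILIES = (
--     "gpt-4o",
--     "gpt-4.1",
--     "gpt-5",
--     "o1",
--     "o3",
--     "o4",
--     "qwen",
--     "deepseek",
--     "llama",
--     "claude",
--     "gemini",
--     "mistral",
-- )
--
--
-- def _fallback_encoding_name_for_model(model: str) -> str:
--     # Work on the path segments directly instead of re-joining and scanning the
--     # joined string: a "/prefix" substring can only begin at a segment boundary.
--     tokens = [part.strip() for part in str(model).strip().split("/")]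
--     i = 0
--     while i < len(tokens) - 1 and tokens[i].lower() in _TOKENIZER_PROVIDER_PREFIXES:
--         i += 1
--     segments = [tok.lower() for tok in tokens[i:] if tok]
--     if any(seg.startswith(fam) for seg in segments for fam in _MODERN_FAMILIES):
--         return "o200k_base"
--     return "cl100k_base"
-- ===== Notes on version B (the rewrite author's own statement) =====
-- stated objective: alternative
-- what changed: B never re-joins the normalized path: it keeps the stripped path segments as a list and picks the modern encoding iff some segment starts with a modern-family prefix, replacing A's combined startswith-or-slash-prefixed-substring scan of the re-joined string (equivalent because such a substring occurrence can only begin at a segment boundary).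
import Mathlib
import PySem

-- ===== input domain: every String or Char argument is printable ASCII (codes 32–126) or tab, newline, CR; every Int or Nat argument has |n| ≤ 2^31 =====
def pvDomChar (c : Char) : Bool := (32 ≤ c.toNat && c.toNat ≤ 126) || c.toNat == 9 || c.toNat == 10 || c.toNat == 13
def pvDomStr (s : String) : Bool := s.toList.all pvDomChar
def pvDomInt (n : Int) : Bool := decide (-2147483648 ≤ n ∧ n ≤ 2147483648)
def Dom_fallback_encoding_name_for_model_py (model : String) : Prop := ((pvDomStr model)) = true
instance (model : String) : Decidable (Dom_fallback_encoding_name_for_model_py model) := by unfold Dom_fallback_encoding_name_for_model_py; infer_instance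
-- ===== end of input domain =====

-- B replaces A's scan of the re-joined normalized string (startswith ∨ "/prefix" substring)
-- by a per-path-segment startswith check, never re-joining the segments (objective: alternative).

-- ===== PORT A =====
def pvProviderPrefixes : PySem.Set String :=
  PySem.Set.ofList ["openai", "openrouter", "anthropic", "azure", "hosted_vllm", "vertex_ai", "bedrock", "ollama"]

-- the 'while len(parts) > 1 and parts[0].strip().lower() in _TOKENIZER_PROVIDER_PREFIXES: parts = parts[1:]' loop
def pvDropProviders (parts : List String) : List String :=
  match parts with
  | p :: q :: rest =>
    if pvProviderPrefixes.contains (PySem.Str.lower (PySem.Str.strip p)) then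
      pvDropProviders (q :: rest)
    else p :: q :: rest
  | other => other

def normalize_model_for_tokenizer_py (model : String) : String :=
  let normalized := PySem.Str.strip model
  if normalized = "" then normalized
  else
    let parts := (PySem.Str.split? normalized "/").getD []   -- sep "/" ≠ "", so split? is `some`
    let parts := pvDropProviders parts
    PySem.Str.join "/" ((parts.map PySem.Str.strip).filter (fun part => part ≠ ""))

def fallback_encoding_name_for_model_py (model : String) : String :=
  let normalized := PySem.Str.lower (normalize_model_for_tokenizer_py model)
  let modern_families : List String :=
    ["gpt-4o", "gpt-4.1", "gpt-5", "o1", "o3", "o4", "qwen", "deepseek", "llama", "claude", "gemini", "mistral"]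
  if modern_families.any (fun pre => PySem.Str.startswith normalized pre || PySem.Str.isIn ("/" ++ pre) normalized) then
    "o200k_base"
  else
    "cl100k_base"

-- ===== PORT B =====
def pvModernFamilies : List String :=
  ["gpt-4o", "gpt-4.1", "gpt-5", "o1", "o3", "o4", "qwen", "deepseek", "llama", "claude", "gemini", "mistral"]

-- the 'while i < len(tokens) - 1 and tokens[i].lower() in _TOKENIZER_PROVIDER_PREFIXES: i += 1' loop
def pvSkipFrom (tokens : List String) (i : Nat) : Nat :=
  if i < tokens.length - 1 ∧ pvProviderPrefixes.contains (PySem.Str.lower (tokens.getD i "")) = true then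
    pvSkipFrom tokens (i + 1)
  else i
termination_by tokens.length - i
decreasing_by omega

def fallback_encoding_name_for_model_py_alt (model : String) : String :=
  let tokens := ((PySem.Str.split? (PySem.Str.strip model) "/").getD []).map PySem.Str.strip
  let segments := ((tokens.drop (pvSkipFrom tokens 0)).filter (fun tok => tok ≠ "")).map PySem.Str.lower
  if segments.any (fun seg => pvModernFamilies.any (fun fam => PySem.Str.startswith seg fam)) then
    "o200k_base"
  else
    "cl100k_base"

-- ===== PRECONDITION & SPEC =====
def Spec_fallback_encoding_name_for_model_py (model : String) (out : String) : Prop := out = fallback_encoding_name_for_model_py_alt model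
instance (model : String) (out : String) : Decidable (Spec_fallback_encoding_name_for_model_py model out) := by unfold Spec_fallback_encoding_name_for_model_py; infer_instance

-- ===== CLAIM (what is proved, stated in full; the proofs are below) =====
def Claim_equal_fallback_encoding_name_for_model_py : Prop := ∀ (model : String), Dom_fallback_encoding_name_for_model_py model → Spec_fallback_encoding_name_for_model_py model (fallback_encoding_name_for_model_py model)

-- ===== LEMMAS AND PROOFS =====

-- A-shaped structural version of B's index-based skip loop (proof helper)
def pvListSkip (parts : List String) : List String :=
  match parts with
  | t :: u :: rest =>
    if pvProviderPrefixes.contains (PySem.Str.lower t) then pvListSkip (u :: rest)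
    else t :: u :: rest
  | other => other

theorem pv_go_slash_free (fuel : Nat) :
    ∀ (l cur : List Char) (acc : List (List Char)), l.length < fuel → '/' ∉ cur →
      (∀ p ∈ acc, '/' ∉ p) → ∀ p ∈ PySem.Chars.splitOn.go ['/'] fuel l cur acc, '/' ∉ p := by
  induction fuel with
  | zero => intro l cur acc h; omega
  | succ fuel ih =>
    intro l cur acc hlen hcur hacc p hp
    cases l with
    | nil =>
      simp [PySem.Chars.splitOn.go] at hp
      rcases hp with h | h
      · exact hacc _ h
      · subst h; simpa using hcur
    | cons c rest =>
      by_cases hc : c = '/'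
      · subst hc
        rw [show PySem.Chars.splitOn.go ['/'] (fuel+1) ('/'::rest) cur acc
              = PySem.Chars.splitOn.go ['/'] fuel rest [] (cur.reverse :: acc) from by
          simp [PySem.Chars.splitOn.go, List.isPrefixOf]] at hp
        refine ih rest [] (cur.reverse :: acc) (by simpa using hlen) (by simp) ?_ p hp
        intro q hq
        rcases List.mem_cons.mp hq with h | h
        · subst h; simpa using hcur
        · exact hacc _ h
      · rw [show PySem.Chars.splitOn.go ['/'] (fuel+1) (c::rest) cur acc
              = PySem.Chars.splitOn.go ['/'] fuel rest (c :: cur) acc from by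
          simp [PySem.Chars.splitOn.go, List.isPrefixOf, Ne.symm hc]] at hp
        refine ih rest (c :: cur) acc (by simpa using hlen) ?_ hacc p hp
        simp [hcur, Ne.symm hc]

theorem pv_split_toList (s : String) :
    ((PySem.Str.split? s "/").getD []).map String.toList = PySem.Chars.splitOn s.toList ['/'] := by
  have h := PySem.Str.split?_map s "/"
  rw [show ("/" : String).toList = ['/'] from rfl] at h
  rw [show PySem.Chars.split? s.toList ['/'] = some (PySem.Chars.splitOn s.toList ['/']) from by
    simp [PySem.Chars.split?]] at h
  cases hs : PySem.Str.split? s "/" with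
  | none => rw [hs] at h; simp at h
  | some parts => rw [hs] at h; simpa using h

theorem pv_strip_mem {c : Char} {s : List Char} (h : c ∈ PySem.Chars.strip s) : c ∈ s := by
  simp only [PySem.Chars.strip, PySem.Chars.rstrip, PySem.Chars.lstrip, List.mem_reverse] at h
  have h1 := (List.dropWhile_sublist (l := (List.dropWhile PySem.Chars.isspace s).reverse) PySem.Chars.isspace).mem h
  rw [List.mem_reverse] at h1
  exact (List.dropWhile_sublist PySem.Chars.isspace).mem h1

theorem pv_lowerChar_slash {c : Char} (h : PySem.Chars.lowerChar c = '/') : c = '/' := by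
  by_cases hu : PySem.Chars.isupper c = true
  · exfalso
    simp only [PySem.Chars.lowerChar, hu, if_pos] at h
    simp only [PySem.Chars.isupper, Bool.and_eq_true, decide_eq_true_eq] at hu
    have hAc : 65 ≤ c.toNat := Nat.succ_le_of_lt hu.1
    have hZc : c.toNat ≤ 90 := by
      have h2 := hu.2
      exact Fin.mk_le_mk.mp h2
    have hv : (c.toNat + 32).isValidChar := Or.inl (by omega)
    have ht : (Char.ofNat (c.toNat + 32)).toNat = c.toNat + 32 := by
      rw [Char.toNat_ofNat]
      simp [hv]
    rw [h] at ht
    have h47 : ('/' : Char).toNat = 47 := rfl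
    omega
  · simpa [PySem.Chars.lowerChar, hu] using h

theorem pv_lower_slash_free {s : List Char} (h : '/' ∉ s) : '/' ∉ PySem.Chars.lower s := by
  simp only [PySem.Chars.lower, List.mem_map, not_exists]
  intro c hc
  exact h (pv_lowerChar_slash hc.2 ▸ hc.1)

theorem pv_lower_join (L : List (List Char)) :
    PySem.Chars.lower (PySem.Chars.join ['/'] L) = PySem.Chars.join ['/'] (L.map PySem.Chars.lower) := by
  induction L with
  | nil => simp [PySem.Chars.join_nil, PySem.Chars.lower]
  | cons a t ih =>
    cases t with
    | nil => simp [PySem.Chars.join_singleton]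
    | cons b t' =>
      simp only [List.map_cons, PySem.Chars.join_cons_cons]
      have ih' : PySem.Chars.join ['/'] (PySem.Chars.lower b :: List.map PySem.Chars.lower t')
          = PySem.Chars.lower (PySem.Chars.join ['/'] (b :: t')) := by
        rw [ih]; simp [List.map_cons]
      rw [ih']
      simp [PySem.Chars.lower, List.map_append, PySem.Chars.lowerChar, PySem.Chars.isupper]

theorem pv_prefix_append_slash (p a J : List Char) (hp : '/' ∉ p) :
    p <+: a ++ '/' :: J ↔ p <+: a := by
  constructor
  · intro h
    rcases List.prefix_or_prefix_of_prefix h (List.prefix_append a ('/' :: J)) with h1 | h1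
    · exact h1
    · rcases h1 with ⟨t, ht⟩
      cases t with
      | nil => simp at ht; exact ht ▸ List.prefix_refl a
      | cons c t' =>
        exfalso
        rw [← ht] at h hp
        have h2 : c :: t' <+: '/' :: J := (List.prefix_append_right_inj a).mp h
        have hc := (List.cons_prefix_cons.mp h2).1
        exact hp (by simp [hc])
  · intro h
    exact h.trans (List.prefix_append a ('/' :: J))

theorem pv_not_infix_slash (p a : List Char) (ha : '/' ∉ a) : ¬ ('/' :: p <:+: a) := by
  intro h
  exact ha (List.IsInfix.mem (List.mem_cons_self) h)

theorem pv_infix_slash (p : List Char) (J : List Char) :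
    ∀ a : List Char, '/' ∉ a → (('/' :: p <:+: a ++ '/' :: J) ↔ (p <+: J ∨ '/' :: p <:+: J)) := by
  intro a
  induction a with
  | nil =>
    intro _
    simp only [List.nil_append, List.infix_cons_iff, List.cons_prefix_cons]
    constructor
    · rintro (⟨-, h⟩ | h)
      · exact Or.inl h
      · exact Or.inr h
    · rintro (h | h)
      · exact Or.inl ⟨trivial, h⟩
      · exact Or.inr h
  | cons c a' ih =>
    intro ha
    have hc : c ≠ '/' := fun h => ha (h ▸ List.mem_cons_self)
    rw [List.cons_append, List.infix_cons_iff]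
    constructor
    · rintro (h | h)
      · rcases List.cons_prefix_cons.mp h with ⟨h1, -⟩
        exact absurd h1.symm hc
      · exact (ih (fun hm => ha (List.mem_cons_of_mem _ hm))).mp h
    · intro h
      exact Or.inr ((ih (fun hm => ha (List.mem_cons_of_mem _ hm))).mpr h)

theorem pv_cond_join (p : List Char) (hp : p ≠ []) (hps : '/' ∉ p) :
    ∀ L : List (List Char), (∀ s ∈ L, '/' ∉ s) →
      ((p <+: PySem.Chars.join ['/'] L ∨ ('/' :: p) <:+: PySem.Chars.join ['/'] L) ↔ ∃ s ∈ L, p <+: s) := by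
  intro L
  induction L with
  | nil =>
    intro _
    simp only [PySem.Chars.join_nil]
    constructor
    · rintro (h | h)
      · exact absurd (List.prefix_nil.mp h) hp
      · exact absurd (List.infix_nil.mp h) (by simp)
    · rintro ⟨s, hs, -⟩; exact absurd hs (List.not_mem_nil)
  | cons a t ih =>
    intro hfree
    have ha : '/' ∉ a := hfree a List.mem_cons_self
    cases t with
    | nil =>
      simp only [PySem.Chars.join_singleton]
      constructor
      · rintro (h | h)
        · exact ⟨a, List.mem_cons_self, h⟩
        · exact absurd h (pv_not_infix_slash p a ha)
      · rintro ⟨s, hs, hps'⟩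
        rcases List.mem_cons.mp hs with h | h
        · exact Or.inl (h ▸ hps')
        · exact absurd h (List.not_mem_nil)
    | cons b t' =>
      rw [PySem.Chars.join_cons_cons]
      have htf : ∀ s ∈ b :: t', '/' ∉ s := fun s hs => hfree s (List.mem_cons_of_mem _ hs)
      have ihr := ih htf
      rw [List.append_assoc, List.singleton_append]
      rw [pv_prefix_append_slash p a _ hps, pv_infix_slash p _ a ha]
      constructor
      · rintro (h | h | h)
        · exact ⟨a, List.mem_cons_self, h⟩
        · rcases ihr.mp (Or.inl h) with ⟨s, hs, hp'⟩
          exact ⟨s, List.mem_cons_of_mem _ hs, hp'⟩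
        · rcases ihr.mp (Or.inr h) with ⟨s, hs, hp'⟩
          exact ⟨s, List.mem_cons_of_mem _ hs, hp'⟩
      · rintro ⟨s, hs, hp'⟩
        rcases List.mem_cons.mp hs with h | h
        · exact Or.inl (h ▸ hp')
        · rcases ihr.mpr ⟨s, h, hp'⟩ with h2 | h2
          · exact Or.inr (Or.inl h2)
          · exact Or.inr (Or.inr h2)

theorem pv_skip_eq (tokens : List String) :
    ∀ i : Nat, tokens.drop (pvSkipFrom tokens i) = pvListSkip (tokens.drop i) := by
  intro i
  induction i using pvSkipFrom.induct tokens with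
  | case1 i hguard ih =>
    rw [pvSkipFrom, if_pos hguard, ih]
    obtain ⟨hi, hc⟩ := hguard
    have hi1 : i < tokens.length := by omega
    have hi2 : i + 1 < tokens.length := by omega
    rw [List.getD_eq_getElem tokens "" hi1] at hc
    conv_rhs => rw [List.drop_eq_getElem_cons hi1, List.drop_eq_getElem_cons hi2, pvListSkip]
    rw [if_pos hc]
    conv_rhs => rw [← List.drop_eq_getElem_cons hi2]
  | case2 i hguard =>
    rw [pvSkipFrom, if_neg hguard]
    by_cases hi : i < tokens.length - 1
    · have hc : ¬ pvProviderPrefixes.contains (PySem.Str.lower (tokens.getD i "")) = true := by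
        intro hc; exact hguard ⟨hi, hc⟩
      have hi1 : i < tokens.length := by omega
      have hi2 : i + 1 < tokens.length := by omega
      rw [List.getD_eq_getElem tokens "" hi1] at hc
      conv_rhs => rw [List.drop_eq_getElem_cons hi1, List.drop_eq_getElem_cons hi2, pvListSkip]
      rw [if_neg hc]
      rw [← List.drop_eq_getElem_cons hi2, ← List.drop_eq_getElem_cons hi1]
    · have hlen : (tokens.drop i).length ≤ 1 := by
        simp [List.length_drop]; omega
      cases hd : tokens.drop i with
      | nil => simp [pvListSkip]
      | cons t r =>
        cases r with
        | nil => simp [pvListSkip]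
        | cons u r' => rw [hd] at hlen; simp at hlen

theorem pv_skip_strip (P : List String) :
    pvListSkip (P.map PySem.Str.strip) = (pvDropProviders P).map PySem.Str.strip := by
  induction P with
  | nil => rfl
  | cons p t ih =>
    cases t with
    | nil => rfl
    | cons q rest =>
      rw [List.map_cons, List.map_cons, pvListSkip, pvDropProviders]
      by_cases hc : pvProviderPrefixes.contains (PySem.Str.lower (PySem.Str.strip p)) = true
      · simp only [hc, if_pos]
        rw [← List.map_cons]
        exact ih
      · rw [if_neg hc, if_neg hc, List.map_cons, List.map_cons]


theorem pv_split_slash_free (s : String) :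
    ∀ p ∈ (PySem.Str.split? s "/").getD [], '/' ∉ p.toList := by
  intro p hp hmem
  have h1 : p.toList ∈ ((PySem.Str.split? s "/").getD []).map String.toList :=
    List.mem_map_of_mem hp
  rw [pv_split_toList] at h1
  simp only [PySem.Chars.splitOn] at h1
  exact pv_go_slash_free (s.toList.length + 1) s.toList [] [] (by omega) (by simp) (by simp)
    p.toList h1 hmem

theorem pv_drop_mem (P : List String) : ∀ x ∈ pvDropProviders P, x ∈ P := by
  induction P with
  | nil => intro x hx; exact hx
  | cons p t ih =>
    cases t with
    | nil => intro x hx; exact hx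
    | cons q rest =>
      rw [pvDropProviders]
      by_cases hc : pvProviderPrefixes.contains (PySem.Str.lower (PySem.Str.strip p)) = true
      · rw [if_pos hc]
        intro x hx
        exact List.mem_cons_of_mem _ (ih x hx)
      · rw [if_neg hc]
        intro x hx
        exact hx

theorem pv_cond_key (N : String) (Lsegs : List String)
    (hN : N.toList = PySem.Chars.join ['/'] (Lsegs.map (fun t => PySem.Chars.lower t.toList)))
    (hfree : ∀ t ∈ Lsegs, '/' ∉ t.toList)
    (pre : String) (hp1 : pre.toList ≠ []) (hp2 : '/' ∉ pre.toList) :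
    ((PySem.Str.startswith N pre || PySem.Str.isIn ("/" ++ pre) N) = true)
      ↔ ∃ seg ∈ Lsegs, pre.toList <+: PySem.Chars.lower seg.toList := by
  rw [Bool.or_eq_true, PySem.Str.startswith_eq, PySem.Str.isIn_eq,
    PySem.Chars.startswith_iff, PySem.Chars.isIn_iff_infix, String.toList_append,
    show ("/" : String).toList ++ pre.toList = '/' :: pre.toList from rfl, hN]
  rw [pv_cond_join pre.toList hp1 hp2 (Lsegs.map (fun t => PySem.Chars.lower t.toList))
    (by
      intro sc hsc
      rcases List.mem_map.mp hsc with ⟨t, ht, rfl⟩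
      exact pv_lower_slash_free (hfree t ht))]
  constructor
  · rintro ⟨sc, hsc, hpp⟩
    rcases List.mem_map.mp hsc with ⟨t, ht, rfl⟩
    exact ⟨t, ht, hpp⟩
  · rintro ⟨t, ht, hpp⟩
    exact ⟨PySem.Chars.lower t.toList, List.mem_map_of_mem ht, hpp⟩

-- ===== VERDICT (by name: the statement is the Claim_ definition above) =====
theorem fallback_encoding_name_for_model_py_spec : Claim_equal_fallback_encoding_name_for_model_py := by
  intro model _
  unfold Spec_fallback_encoding_name_for_model_py
  by_cases h0 : PySem.Str.strip model = ""
  · have hnorm : normalize_model_for_tokenizer_py model = "" := by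
      simp [normalize_model_for_tokenizer_py, h0]
    have hA1 : fallback_encoding_name_for_model_py model = "cl100k_base" := by
      simp only [fallback_encoding_name_for_model_py, hnorm]
      decide
    have hskip : pvSkipFrom [""] 0 = 0 := by rw [pvSkipFrom]; simp
    have hB1 : fallback_encoding_name_for_model_py_alt model = "cl100k_base" := by
      simp only [fallback_encoding_name_for_model_py_alt, h0]
      rw [show ((PySem.Str.split? "" "/").getD []).map PySem.Str.strip = [""] from by decide]
      rw [hskip]
      decide
    rw [hA1, hB1]
  · have hPfree := pv_split_slash_free (PySem.Str.strip model)
    have hLfree : ∀ t ∈ (((pvDropProviders ((PySem.Str.split? (PySem.Str.strip model) "/").getD [])).map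
        PySem.Str.strip).filter (fun part => part ≠ "")), '/' ∉ t.toList := by
      intro t ht hmem
      have ht2 := List.mem_of_mem_filter ht
      rcases List.mem_map.mp ht2 with ⟨p, hp, rfl⟩
      rw [PySem.Str.toList_strip] at hmem
      exact hPfree p (pv_drop_mem _ p hp) (pv_strip_mem hmem)
    have hnorm : normalize_model_for_tokenizer_py model
        = PySem.Str.join "/" (((pvDropProviders ((PySem.Str.split? (PySem.Str.strip model) "/").getD [])).map
            PySem.Str.strip).filter (fun part => part ≠ "")) := by
      simp only [normalize_model_for_tokenizer_py, if_neg h0]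
    have hN : (PySem.Str.lower (normalize_model_for_tokenizer_py model)).toList
        = PySem.Chars.join ['/'] ((((pvDropProviders ((PySem.Str.split? (PySem.Str.strip model) "/").getD [])).map
            PySem.Str.strip).filter (fun part => part ≠ "")).map (fun t => PySem.Chars.lower t.toList)) := by
      rw [hnorm, PySem.Str.toList_lower, PySem.Str.toList_join,
        show ("/" : String).toList = ['/'] from rfl, pv_lower_join, List.map_map]
      rfl
    have hTok : ((((PySem.Str.split? (PySem.Str.strip model) "/").getD []).map PySem.Str.strip).drop
          (pvSkipFrom (((PySem.Str.split? (PySem.Str.strip model) "/").getD []).map PySem.Str.strip) 0)).filter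
            (fun tok => tok ≠ "")
        = ((pvDropProviders ((PySem.Str.split? (PySem.Str.strip model) "/").getD [])).map
            PySem.Str.strip).filter (fun part => part ≠ "") := by
      rw [pv_skip_eq, List.drop_zero, pv_skip_strip]
    have hfams : ∀ pre ∈ (["gpt-4o", "gpt-4.1", "gpt-5", "o1", "o3", "o4", "qwen", "deepseek", "llama",
        "claude", "gemini", "mistral"] : List String), pre.toList ≠ [] ∧ '/' ∉ pre.toList := by decide
    simp only [fallback_encoding_name_for_model_py, fallback_encoding_name_for_model_py_alt,
      pvModernFamilies]
    rw [hTok]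
    have hcond : (["gpt-4o", "gpt-4.1", "gpt-5", "o1", "o3", "o4", "qwen", "deepseek", "llama",
          "claude", "gemini", "mistral"] : List String).any
            (fun pre => PySem.Str.startswith (PySem.Str.lower (normalize_model_for_tokenizer_py model)) pre
              || PySem.Str.isIn ("/" ++ pre) (PySem.Str.lower (normalize_model_for_tokenizer_py model)))
        = ((((pvDropProviders ((PySem.Str.split? (PySem.Str.strip model) "/").getD [])).map
              PySem.Str.strip).filter (fun part => part ≠ "")).map PySem.Str.lower).any
            (fun seg => (["gpt-4o", "gpt-4.1", "gpt-5", "o1", "o3", "o4", "qwen", "deepseek", "llama",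
              "claude", "gemini", "mistral"] : List String).any (fun fam => PySem.Str.startswith seg fam)) := by
      rw [Bool.eq_iff_iff, List.any_eq_true, List.any_eq_true]
      constructor
      · rintro ⟨pre, hpre, hor⟩
        rcases (pv_cond_key _ _ hN hLfree pre (hfams pre hpre).1 (hfams pre hpre).2).mp hor
          with ⟨t, ht, hpp⟩
        refine ⟨PySem.Str.lower t, List.mem_map_of_mem ht, ?_⟩
        rw [List.any_eq_true]
        refine ⟨pre, hpre, ?_⟩
        rw [PySem.Str.startswith_eq, PySem.Chars.startswith_iff, PySem.Str.toList_lower]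
        exact hpp
      · rintro ⟨seg, hseg, hfam⟩
        rcases List.mem_map.mp hseg with ⟨t, ht, rfl⟩
        rcases List.any_eq_true.mp hfam with ⟨pre, hpre, hsw⟩
        refine ⟨pre, hpre, ?_⟩
        rw [PySem.Str.startswith_eq, PySem.Chars.startswith_iff, PySem.Str.toList_lower] at hsw
        exact (pv_cond_key _ _ hN hLfree pre (hfams pre hpre).1 (hfams pre hpre).2).mpr ⟨t, ht, hsw⟩
    rw [hcond]
    rfl
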